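-- pv_equiv track=rewrite | github.com/BlessenJoelG/Logic.py | LEETCODE-PRAC/2553. Separate the Digits in an Array.py | separateDigits
-- ===== SOURCE A (Python) =====
-- from typing import List
--
-- def separateDigits(nums: List[int]) -> List[int]:
--     nums_digi = []
--     def num_split(a):
--         for _ in str(a):
--             nums_digi.append(int(_))
--         return nums_digi
--     for _ in nums:
--         num_split(_)
--     return(nums_digi)
-- ===== SOURCE B (Python) =====
-- def separateDigits(nums):
--     out = []
--     for n in nums:
--         if n == 0:
--             out.append(0)
--         else:
--             ds = []
--             while n > 0:
--                 ds.append(n % 10)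
--                 n //= 10
--             out.extend(reversed(ds))
--     return out
-- ===== Notes on version B (the rewrite author's own statement) =====
-- stated objective: alternative
-- what changed: B extracts digits arithmetically with repeated divmod-by-10 and a reverse, instead of converting each number to a string and parsing each character back to an int.
import Mathlib
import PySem

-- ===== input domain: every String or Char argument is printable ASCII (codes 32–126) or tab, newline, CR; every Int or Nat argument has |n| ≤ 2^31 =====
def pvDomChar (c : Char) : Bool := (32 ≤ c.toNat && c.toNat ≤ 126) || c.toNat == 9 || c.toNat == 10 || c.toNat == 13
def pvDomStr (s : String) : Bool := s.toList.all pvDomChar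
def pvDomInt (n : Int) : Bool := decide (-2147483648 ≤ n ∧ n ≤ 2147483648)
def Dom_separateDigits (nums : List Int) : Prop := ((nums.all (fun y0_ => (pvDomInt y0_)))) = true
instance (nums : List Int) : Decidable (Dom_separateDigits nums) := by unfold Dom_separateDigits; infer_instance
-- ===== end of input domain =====

-- B replaces A's str(n)/int(char) round trip by arithmetic digit extraction (divmod by 10, then reverse).

-- ===== PORT A =====
-- str(a) is PySem.Int.toChars; int(c) is PySem.Int.ofChars? [c] (always a digit under Pre_, so .getD 0)
def separateDigits (nums : List Int) : List Int :=
  nums.foldl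
    (fun acc a =>
      (PySem.Int.toChars a).foldl
        (fun d c => d ++ [(PySem.Int.ofChars? [c]).getD 0]) acc)
    []

-- ===== PORT B =====
-- the 'while n > 0' loop of Source B, collecting least-significant digits first
def bDigitsLSF (n : Nat) : List Int :=
  if h : n = 0 then []
  else ((n % 10 : Nat) : Int) :: bDigitsLSF (n / 10)
decreasing_by exact Nat.div_lt_self (Nat.pos_of_ne_zero h) (by norm_num)

def separateDigits_alt (nums : List Int) : List Int :=
  nums.foldl
    (fun out n => if n = 0 then out ++ [0] else out ++ (bDigitsLSF n.toNat).reverse)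
    []

-- ===== PRECONDITION & SPEC =====
-- A raises ValueError on any negative number (int('-') fails while parsing str(n) character by character)
def Pre_separateDigits (nums : List Int) : Prop := ∀ a ∈ nums, 0 ≤ a
instance (nums : List Int) : Decidable (Pre_separateDigits nums) := by unfold Pre_separateDigits; infer_instance
def pvWitness_separateDigits : List Int := [123, 0, 45]

def Spec_separateDigits (nums : List Int) (out : List Int) : Prop := out = separateDigits_alt nums
instance (nums : List Int) (out : List Int) : Decidable (Spec_separateDigits nums out) := by unfold Spec_separateDigits; infer_instance

-- ===== CLAIM (what is proved, stated in full; the proofs are below) =====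
def Claim_equal_separateDigits : Prop := ∀ (nums : List Int), Dom_separateDigits nums → Pre_separateDigits nums → Spec_separateDigits nums (separateDigits nums)

-- ===== LEMMAS AND PROOFS =====

-- the characters Nat.toDigits produces, written as the structural recursion toDigitsCore performs
def pvChars (n : Nat) : List Char :=
  if h : n / 10 = 0 then [Nat.digitChar (n % 10)]
  else pvChars (n / 10) ++ [Nat.digitChar (n % 10)]
decreasing_by exact Nat.div_lt_self (by omega) (by norm_num)

lemma toDigitsCore_eq (f : Nat) : ∀ n acc, n < f →
    Nat.toDigitsCore 10 f n acc = pvChars n ++ acc := by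
  induction f with
  | zero => intro n acc h; omega
  | succ f ih =>
    intro n acc h
    rw [Nat.toDigitsCore, pvChars]
    by_cases h10 : n / 10 = 0
    · simp [h10]
    · simp only [h10, if_false]
      rw [ih (n / 10) _ (by omega)]
      simp

lemma toDigits_eq (n : Nat) : Nat.toDigits 10 n = pvChars n := by
  rw [Nat.toDigits, toDigitsCore_eq (n + 1) n [] (by omega)]
  simp

lemma ofChars_digitChar (d : Nat) (hd : d < 10) :
    (PySem.Int.ofChars? [Nat.digitChar d]).getD 0 = (d : Int) := by
  interval_cases d <;> decide

-- mapping int(·) over the decimal characters of n yields B's digit list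
lemma map_pvChars (n : Nat) :
    (pvChars n).map (fun c => (PySem.Int.ofChars? [c]).getD 0)
      = if n = 0 then [0] else (bDigitsLSF n).reverse := by
  induction n using Nat.strong_induction_on with
  | _ n ih =>
    rw [pvChars]
    by_cases h10 : n / 10 = 0
    · by_cases h0 : n = 0
      · subst h0; decide
      · simp only [dif_pos h10, List.map_cons, List.map_nil, if_neg h0]
        rw [bDigitsLSF, dif_neg h0, bDigitsLSF, dif_pos h10]
        simp [ofChars_digitChar (n % 10) (by omega)]
    · have hn : n ≠ 0 := by omega
      simp only [dif_neg h10, List.map_append, List.map_cons, List.map_nil, if_neg hn]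
      rw [ih (n / 10) (Nat.div_lt_self (by omega) (by norm_num)), if_neg h10]
      rw [show bDigitsLSF n = ((n % 10 : Nat) : Int) :: bDigitsLSF (n / 10) from by
        rw [bDigitsLSF, dif_neg hn]]
      simp [ofChars_digitChar (n % 10) (by omega)]

-- A's inner loop over one nonnegative number contributes exactly B's digits of that number
lemma elem_eq (acc : List Int) (a : Int) (ha : 0 ≤ a) :
    (PySem.Int.toChars a).foldl (fun d c => d ++ [(PySem.Int.ofChars? [c]).getD 0]) acc
      = if a = 0 then acc ++ [0] else acc ++ (bDigitsLSF a.toNat).reverse := by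
  rw [PySem.List.foldl_append_singleton_eq_map]
  have : PySem.Int.toChars a = Nat.toDigits 10 a.toNat := by
    simp [PySem.Int.toChars, not_lt.mpr ha]
  rw [this, toDigits_eq, map_pvChars]
  have hiff : a = 0 ↔ a.toNat = 0 := by omega
  by_cases h : a = 0
  · simp [h]
  · simp [h, hiff.not.mp h]

-- ===== VERDICT (by name: the statement is the Claim_ definition above) =====
theorem separateDigits_spec : Claim_equal_separateDigits := by
  intro nums _ hpre
  unfold Spec_separateDigits separateDigits separateDigits_alt
  apply PySem.List.foldl_congr_mem
  intro acc a ha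
  rw [elem_eq acc a (hpre a ha)]
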